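-- pv_equiv track=rewrite | github.com/phil21797/sensor-planning-sim | sim_world/simworld.py | TagValue
-- ===== SOURCE A (Python) =====
-- def TagValue(tags, key):
--     """
--     Get the value of a key tag.
--
--     Usage:
--         value = TagValue(tags, key)
--
--     Arguments:
--         tags: (set or list) The object tags. If a string, each tag in the string
--         must be seperated by a period.
--
--         key: (str) The key of the tag whose value is to be retrieved (not
--         including the equal sign). Keyed tags look like KEY=VALUE where KEY and
--         VALUE are any strings not containing "_".
--
--     Returns:
--         value: (str) The value of the tag is returned in a string. If the tag
--         doesn't exist, then the empty string is returned.
--     """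
--
--     if type(tags) == str:
--         tags = set(tags.split('_'))        # convert string to set
--     elif type(tags) != set:
--         raise ValueError('Tags argument must be a string or set of strings')
--
--     value = ""
--     key = key.lower() + "="
--     for t in tags:
--         if t.startswith(key):
--             value = t[len(key):]
--             break
--
--     return value
-- ===== SOURCE B (Python) =====
-- def TagValue(tags, key):
--     if type(tags) == str:
--         tags = set(tags.split('_'))        # convert string to set
--     elif type(tags) != set:
--         raise ValueError('Tags argument must be a string or set of strings')
--
--     # Build a prefix -> value index in one pass (first-wins), then do a single lookup.
--     index = {}
--     for t in tags:
--         i = t.find('=')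
--         if i >= 0:
--             index.setdefault(t[:i], t[i + 1:])
--     return index.get(key.lower(), '')
-- ===== Notes on version B (the rewrite author's own statement) =====
-- stated objective: alternative
-- what changed: Instead of scanning the tag set for the first tag whose text starts with key.lower()+'=', B splits every tag once at its first '=' into a prefix->value index dict (first-wins via setdefault) and answers with a single index.get(key.lower(), '').
-- outside the precondition, e.g. on TagValue('a=b=c', 'a=b'): A returns 'c', B returns ''; on TagValue('k=1_k=2', 'k'): A returns '1', B returns '1'
import Mathlib
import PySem

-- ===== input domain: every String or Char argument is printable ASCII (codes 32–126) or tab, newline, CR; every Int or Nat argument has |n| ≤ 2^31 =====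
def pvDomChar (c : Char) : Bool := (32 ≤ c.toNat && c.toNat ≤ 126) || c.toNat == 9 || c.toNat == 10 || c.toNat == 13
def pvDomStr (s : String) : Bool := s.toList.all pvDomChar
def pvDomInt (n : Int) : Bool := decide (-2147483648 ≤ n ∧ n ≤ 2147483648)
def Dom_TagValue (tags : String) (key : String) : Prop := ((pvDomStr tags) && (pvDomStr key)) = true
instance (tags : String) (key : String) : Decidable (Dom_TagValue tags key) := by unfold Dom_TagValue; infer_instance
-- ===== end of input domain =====

-- B replaces A's first-match prefix scan over the tag set by a split-once prefix->value
-- index dict (first-wins) followed by a single lookup (objective: alternative decomposition).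

-- ===== PORT A =====
-- the 'for t in tags: if t.startswith(key): value = t[len(key):]; break' loop
def pvScanA (keyeq : List Char) : List (List Char) → List Char
  | [] => []
  | t :: rest =>
    if PySem.Chars.startswith t keyeq then PySem.List.slice t (some (keyeq.length : Int)) none
    else pvScanA keyeq rest

def TagValue (tags : String) (key : String) : String :=
  String.mk (pvScanA (PySem.Chars.lower key.toList ++ ['='])
    (PySem.Set.ofList (PySem.Chars.splitOn tags.toList ['_'])))

-- ===== PORT B =====
-- loop body: i = t.find('='); if i >= 0: index.setdefault(t[:i], t[i+1:])
def pvStepB (d : PySem.Dict (List Char) (List Char)) (t : List Char) :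
    PySem.Dict (List Char) (List Char) :=
  if 0 ≤ PySem.Chars.find t ['='] then
    PySem.Dict.setdefault d (PySem.List.slice t none (some (PySem.Chars.find t ['='])))
      (PySem.List.slice t (some (PySem.Chars.find t ['='] + 1)) none)
  else d

def pvIndexB (ts : List (List Char)) : PySem.Dict (List Char) (List Char) :=
  ts.foldl pvStepB PySem.Dict.empty

def TagValue_alt (tags : String) (key : String) : String :=
  String.mk (PySem.Dict.getD
    (pvIndexB (PySem.Set.ofList (PySem.Chars.splitOn tags.toList ['_'])))
    (PySem.Chars.lower key.toList) [])

-- ===== PRECONDITION & SPEC =====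
-- Pre_ excludes two corners on which A still returns a value: (1) tag strings whose split
-- contains two or more DISTINCT tags matching the key, where A's answer depends on Python's
-- hash-based set iteration order and is not a deterministic function of the input, and
-- (2) keys containing '=' (forbidden by A's docstring) for which some tag actually matches:
-- there A prefix-matches across '=' where a single-split index cannot.
def Pre_TagValue (tags : String) (key : String) : Prop :=
  ((PySem.Set.ofList (PySem.Chars.splitOn tags.toList ['_'])).filter
      (fun t => PySem.Chars.startswith t (PySem.Chars.lower key.toList ++ ['=']))).length ≤ 1 ∧
  ('=' ∈ PySem.Chars.lower key.toList →
    ((PySem.Set.ofList (PySem.Chars.splitOn tags.toList ['_'])).filter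
        (fun t => PySem.Chars.startswith t (PySem.Chars.lower key.toList ++ ['=']))) = [])

instance (tags : String) (key : String) : Decidable (Pre_TagValue tags key) := by
  unfold Pre_TagValue; infer_instance

def pvWitness_TagValue : String × String := ("color=red_size=3", "SIZE")

def Spec_TagValue (tags : String) (key : String) (out : String) : Prop := out = TagValue_alt tags key
instance (tags : String) (key : String) (out : String) : Decidable (Spec_TagValue tags key out) := by unfold Spec_TagValue; infer_instance

-- ===== CLAIM (what is proved, stated in full; the proofs are below) =====
def Claim_equal_TagValue : Prop := ∀ (tags : String) (key : String), Dom_TagValue tags key → Pre_TagValue tags key → Spec_TagValue tags key (TagValue tags key)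

-- ===== LEMMAS AND PROOFS =====

theorem pv_get?_mk_append_singleton (l : List (List Char × List Char)) (p w k : List Char) :
    (PySem.Dict.mk (l ++ [(p, w)])).get? k
      = ((PySem.Dict.mk l).get? k).orElse (fun _ => if p == k then some w else none) := by
  induction l with
  | nil =>
    simp only [List.nil_append]
    rw [PySem.Dict.get?_mk_cons]
    cases h : (p == k) <;> rfl
  | cons hd tl ih =>
    simp only [List.cons_append]
    rw [PySem.Dict.get?_mk_cons, PySem.Dict.get?_mk_cons]
    cases h : (hd.1 == k) <;> simp [ih]

theorem pv_setdefault_some {d : PySem.Dict (List Char) (List Char)} {k v : List Char}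
    (p w : List Char) (h : d.get? k = some v) :
    (PySem.Dict.setdefault d p w).get? k = some v := by
  unfold PySem.Dict.setdefault
  split
  · exact h
  · have : PySem.Dict.mk (d.items ++ [(p, w)]) = PySem.Dict.mk (d.items ++ [(p, w)]) := rfl
    rw [show ({ items := d.items ++ [(p, w)] } : PySem.Dict (List Char) (List Char))
          = PySem.Dict.mk (d.items ++ [(p, w)]) from rfl,
        pv_get?_mk_append_singleton]
    rw [show PySem.Dict.mk d.items = d from rfl, h]
    rfl

theorem pv_setdefault_none_ne {d : PySem.Dict (List Char) (List Char)} {k : List Char}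
    {p : List Char} (w : List Char) (hne : (p == k) = false) (h : d.get? k = none) :
    (PySem.Dict.setdefault d p w).get? k = none := by
  unfold PySem.Dict.setdefault
  split
  · exact h
  · rw [show ({ items := d.items ++ [(p, w)] } : PySem.Dict (List Char) (List Char))
          = PySem.Dict.mk (d.items ++ [(p, w)]) from rfl,
        pv_get?_mk_append_singleton]
    rw [show PySem.Dict.mk d.items = d from rfl, h, hne]
    rfl

theorem pv_setdefault_self_none {d : PySem.Dict (List Char) (List Char)} {k : List Char}
    (w : List Char) (h : d.get? k = none) :
    (PySem.Dict.setdefault d k w).get? k = some w := by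
  unfold PySem.Dict.setdefault
  split
  · rename_i hc
    rw [PySem.Dict.contains_eq_isSome_get?, h] at hc
    simp at hc
  · rw [show ({ items := d.items ++ [(k, w)] } : PySem.Dict (List Char) (List Char))
          = PySem.Dict.mk (d.items ++ [(k, w)]) from rfl,
        pv_get?_mk_append_singleton]
    rw [show PySem.Dict.mk d.items = d from rfl, h]
    simp

theorem pv_foldl_persist {k v : List Char} :
    ∀ (L : List (List Char)) (d : PySem.Dict (List Char) (List Char)),
      d.get? k = some v → (L.foldl pvStepB d).get? k = some v := by
  intro L
  induction L with
  | nil => intro d h; exact h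
  | cons t rest ih =>
    intro d h
    simp only [List.foldl_cons]
    apply ih
    unfold pvStepB
    split
    · exact pv_setdefault_some _ _ h
    · exact h

-- find over k ++ '=' :: r hits exactly position k.length when k contains no '='
theorem pv_find_boundary {k : List Char} (r : List Char) (hk : '=' ∉ k) :
    PySem.Chars.find (k ++ '=' :: r) ['='] = (k.length : Int) := by
  set t := k ++ '=' :: r with ht
  have hinf : ['='] <:+: t := ⟨k, r, by simp [ht]⟩
  have hf0 : 0 ≤ PySem.Chars.find t ['='] := (PySem.Chars.find_nonneg_iff t ['=']).2 hinf
  obtain ⟨hpre, hmin⟩ := PySem.Chars.find_spec hf0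
  set f := (PySem.Chars.find t ['=']).toNat with hfdef
  have hdropk : t.drop k.length = '=' :: r := by simp [ht]
  have hub : f ≤ k.length := by
    by_contra hlt
    exact hmin k.length (by omega) ⟨r, by simp [hdropk]⟩
  have hlb : ¬ f < k.length := by
    intro hlt
    obtain ⟨s, hs⟩ := hpre
    have hdrop : t.drop f = k.drop f ++ ('=' :: r) := by
      rw [ht, List.drop_append, show f - k.length = 0 by omega]
      rfl
    have h1 : (List.drop f t).head? = some '=' := by rw [← hs]; rfl
    have hkf : k.drop f = k[f] :: k.drop (f + 1) := List.drop_eq_getElem_cons hlt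
    have h2 : (List.drop f t).head? = some k[f] := by rw [hdrop, hkf]; rfl
    have hke : k[f] = '=' := by rw [h2] at h1; exact Option.some.inj h1
    exact hk (hke ▸ k.getElem_mem hlt)
  have hf : f = k.length := by omega
  omega

-- main invariant: B's index lookup equals A's first-match scan, over any tag list
theorem pv_main {k : List Char} (hk : '=' ∉ k) :
    ∀ (L : List (List Char)) (d : PySem.Dict (List Char) (List Char)),
      d.get? k = none →
      PySem.Dict.getD (L.foldl pvStepB d) k [] = pvScanA (k ++ ['=']) L := by
  intro L
  induction L with
  | nil =>
    intro d hd
    simp only [List.foldl_nil, pvScanA]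
    rw [PySem.Dict.getD_eq_get?_getD, hd]
    rfl
  | cons t rest ih =>
    intro d hd
    simp only [List.foldl_cons]
    by_cases hsw : PySem.Chars.startswith t (k ++ ['=']) = true
    · -- matching tag: A returns its suffix; B records k ↦ suffix, never overwritten
      obtain ⟨r, hr⟩ := (PySem.Chars.startswith_iff t (k ++ ['='])).1 hsw
      have htr : t = k ++ '=' :: r := by rw [← hr]; simp
      have hfind : PySem.Chars.find t ['='] = (k.length : Int) := by
        rw [htr]; exact pv_find_boundary r hk
      have hco : k ++ '=' :: r = (k ++ ['=']) ++ r := by simp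
      have hstep : pvStepB d t = PySem.Dict.setdefault d k r := by
        unfold pvStepB
        simp only [hfind]
        rw [if_pos (show (0 : Int) ≤ (k.length : Int) by omega)]
        congr 1
        · rw [PySem.List.slice_to t (by omega), htr]
          simp
        · rw [PySem.List.slice_from t (by omega)]
          rw [show ((k.length : Int) + 1).toNat = k.length + 1 by omega, htr, hco,
              show k.length + 1 = (k ++ ['=']).length by simp, List.drop_left]
      have hget : (rest.foldl pvStepB (pvStepB d t)).get? k = some r := by
        rw [hstep]
        exact pv_foldl_persist rest _ (pv_setdefault_self_none r hd)
      rw [PySem.Dict.getD_eq_get?_getD, hget]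
      simp only [pvScanA, if_pos hsw]
      rw [PySem.List.slice_from t (by omega)]
      rw [show (((k ++ ['=']).length : Int)).toNat = k.length + 1 by simp, htr, hco,
          show k.length + 1 = (k ++ ['=']).length by simp, List.drop_left]
      rfl
    · -- non-matching tag: B's step leaves key k unbound, both sides recurse
      simp only [pvScanA, if_neg hsw]
      by_cases h0 : 0 ≤ PySem.Chars.find t ['=']
      · obtain ⟨hpre, -⟩ := PySem.Chars.find_spec h0
        set f := (PySem.Chars.find t ['=']).toNat with hf
        have hne : ((t.take f : List Char) == k) = false := by
          apply beq_eq_false_iff_ne.2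
          intro heq
          obtain ⟨s, hs⟩ := hpre
          apply hsw
          rw [PySem.Chars.startswith_iff]
          refine ⟨s, ?_⟩
          conv_rhs => rw [← List.take_append_drop f t]
          rw [heq, ← hs]
          simp
        have hstep : (pvStepB d t).get? k = none := by
          unfold pvStepB
          rw [if_pos h0, PySem.List.slice_to t h0]
          exact pv_setdefault_none_ne _ hne hd
        exact ih _ hstep
      · have hstep : pvStepB d t = d := by unfold pvStepB; rw [if_neg h0]
        rw [hstep]
        exact ih d hd

-- a key containing '=' can never be bound by B's index (bound prefixes stop at the first '=')
theorem pv_no_eq_key {k : List Char} (hk : '=' ∈ k) :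
    ∀ (L : List (List Char)) (d : PySem.Dict (List Char) (List Char)),
      d.get? k = none → (L.foldl pvStepB d).get? k = none := by
  intro L
  induction L with
  | nil => intro d hd; exact hd
  | cons t rest ih =>
    intro d hd
    simp only [List.foldl_cons]
    apply ih
    by_cases h0 : 0 ≤ PySem.Chars.find t ['=']
    · obtain ⟨-, hmin⟩ := PySem.Chars.find_spec h0
      set f := (PySem.Chars.find t ['=']).toNat with hf
      have hne : ((t.take f : List Char) == k) = false := by
        apply beq_eq_false_iff_ne.2
        intro heq
        rw [← heq] at hk
        obtain ⟨i, hi, hgi⟩ := List.getElem_of_mem hk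
        have hif : i < f := lt_of_lt_of_le hi (by simp)
        have hit : i < t.length := lt_of_lt_of_le hi (by simp)
        apply hmin i hif
        refine ⟨t.drop (i + 1), ?_⟩
        rw [List.drop_eq_getElem_cons hit]
        rw [List.getElem_take] at hgi
        simp [hgi]
      have : (pvStepB d t).get? k = none := by
        unfold pvStepB
        rw [if_pos h0, PySem.List.slice_to t h0]
        exact pv_setdefault_none_ne _ hne hd
      exact this
    · have : pvStepB d t = d := by unfold pvStepB; rw [if_neg h0]
      rw [this]; exact hd

theorem pv_scan_none (keq : List Char) :
    ∀ L : List (List Char), (∀ t ∈ L, PySem.Chars.startswith t keq = false) →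
      pvScanA keq L = [] := by
  intro L
  induction L with
  | nil => intro _; rfl
  | cons t rest ih =>
    intro h
    have ht := h t (List.mem_cons_self)
    simp only [pvScanA, ht, Bool.false_eq_true, if_false]
    exact ih (fun u hu => h u (List.mem_cons_of_mem _ hu))

-- ===== VERDICT (by name: the statement is the Claim_ definition above) =====
theorem TagValue_spec : Claim_equal_TagValue := by
  intro tags key _ hpre
  obtain ⟨-, h2⟩ := hpre
  unfold Spec_TagValue TagValue TagValue_alt pvIndexB
  by_cases hk : '=' ∈ PySem.Chars.lower key.toList
  · have hm := h2 hk
    congr 1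
    rw [pv_scan_none _ _ (by
      intro u hu
      have := List.filter_eq_nil_iff.1 hm u hu
      simpa using this)]
    rw [PySem.Dict.getD_eq_get?_getD,
      pv_no_eq_key hk _ PySem.Dict.empty (by simp [PySem.Dict.get?_empty])]
    rfl
  · congr 1
    exact (pv_main hk _ PySem.Dict.empty (by simp [PySem.Dict.get?_empty])).symm
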